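-- pv_equiv track=rewrite | github.com/miliar/Code_Jam_Webscraper | solutions_python/Problem_178/4045.py | calculate_num_flips
-- ===== SOURCE A (Python) =====
-- def calculate_num_flips( pancake_string ):
-- 	num_flips = 0
-- 	last_p = pancake_string[0]
--
-- 	for p in pancake_string:
-- 		if p != last_p:
-- 			num_flips += 1
-- 			last_p = p
--
-- 	if last_p == '-':
-- 		num_flips += 1
--
-- 	return str(num_flips)
-- ===== SOURCE B (Python) =====
-- def calculate_num_flips(pancake_string):
--     n = len(pancake_string)
--
--     def bnd(i, j):
--         # number of adjacent unequal pairs inside pancake_string[i:j], by midpoint split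
--         if j - i < 2:
--             return 0
--         m = (i + j) // 2
--         return bnd(i, m) + bnd(m, j) + (pancake_string[m - 1] != pancake_string[m])
--
--     return str(bnd(0, n) + (pancake_string[-1] == '-'))
-- ===== Notes on version B (the rewrite author's own statement) =====
-- stated objective: alternative
-- what changed: Replaces A's single left-to-right scan carrying a running last_p with a divide-and-conquer recursion that splits the index interval at its midpoint and sums the mismatch counts of the two halves plus the one junction pair, before the final adjustment for an unhappy last character.
import Mathlib
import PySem

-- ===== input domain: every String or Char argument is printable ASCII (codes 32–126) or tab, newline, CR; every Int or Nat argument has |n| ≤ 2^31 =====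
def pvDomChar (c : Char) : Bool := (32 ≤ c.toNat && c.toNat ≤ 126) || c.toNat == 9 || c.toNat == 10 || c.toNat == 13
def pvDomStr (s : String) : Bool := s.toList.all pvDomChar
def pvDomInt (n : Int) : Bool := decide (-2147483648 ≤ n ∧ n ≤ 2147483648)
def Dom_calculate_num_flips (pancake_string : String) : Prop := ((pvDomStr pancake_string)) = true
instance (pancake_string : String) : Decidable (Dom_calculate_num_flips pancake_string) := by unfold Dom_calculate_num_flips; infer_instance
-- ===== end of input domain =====

-- B replaces A's running-last_p linear scan by a divide-and-conquer recursion on index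
-- intervals (midpoint split, junction pair at the split); objective: alternative.

-- ===== PORT A =====
def calculate_num_flips (pancake_string : String) : String :=
  match PySem.Str.pyGet? pancake_string 0 with
  | none => ""  -- IndexError on empty input; excluded by Pre_
  | some c0 =>
    let st := pancake_string.toList.foldl
      (fun (st : Int × Char) p => if p ≠ st.2 then (st.1 + 1, p) else st) (0, c0)
    let nf := if st.2 == '-' then st.1 + 1 else st.1
    PySem.Int.toStr nf

-- ===== PORT B =====
-- Source B's bnd(i, j): the indices i, j are nonnegative Python ints throughout (0 ≤ i ≤ j ≤ n),
-- so they are ported as Nat; (i + j) // 2 on nonnegative ints is exactly Nat division.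
-- pancake_string[m-1] / pancake_string[m] are in range on every reachable call, so the
-- in-range list read is ported as getD (the default is never used there).
-- 'fuel' is only a structural termination guard (fuel ≥ j - i on every reachable call,
-- and j - i strictly shrinks at each recursive call); it changes no computed value.
def pvBnd (l : List Char) : Nat → Nat → Nat → Int
  | 0, _, _ => 0
  | fuel + 1, i, j =>
    if j - i < 2 then 0
    else
      let m := (i + j) / 2
      pvBnd l fuel i m + pvBnd l fuel m j + (if l.getD (m - 1) ' ' ≠ l.getD m ' ' then 1 else 0)

def calculate_num_flips_alt (pancake_string : String) : String :=
  match PySem.Str.pyGet? pancake_string (-1) with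
  | none => ""  -- IndexError on empty input; excluded by Pre_
  | some last =>
    PySem.Int.toStr (pvBnd pancake_string.toList pancake_string.toList.length 0 pancake_string.toList.length
      + (if last == '-' then 1 else 0))

-- ===== PRECONDITION & SPEC =====
-- A raises IndexError on the empty string (pancake_string[0]); excluded.
def Pre_calculate_num_flips (pancake_string : String) : Prop := pancake_string ≠ ""
instance (pancake_string : String) : Decidable (Pre_calculate_num_flips pancake_string) := by
  unfold Pre_calculate_num_flips; infer_instance
def pvWitness_calculate_num_flips : String := "--+-"

def Spec_calculate_num_flips (pancake_string : String) (out : String) : Prop := out = calculate_num_flips_alt pancake_string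
instance (pancake_string : String) (out : String) : Decidable (Spec_calculate_num_flips pancake_string out) := by unfold Spec_calculate_num_flips; infer_instance

-- ===== CLAIM (what is proved, stated in full; the proofs are below) =====
def Claim_equal_calculate_num_flips : Prop := ∀ (pancake_string : String), Dom_calculate_num_flips pancake_string → Pre_calculate_num_flips pancake_string → Spec_calculate_num_flips pancake_string (calculate_num_flips pancake_string)

-- ===== LEMMAS AND PROOFS =====

-- number of adjacent unequal pairs in a list
def pvB : List Char → Int
  | [] => 0
  | [_] => 0
  | c :: d :: t => (if d ≠ c then 1 else 0) + pvB (d :: t)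

theorem pvB_short (l : List Char) (h : l.length ≤ 1) : pvB l = 0 := by
  match l with
  | [] => rfl
  | [_] => rfl
  | _ :: _ :: _ => simp at h

-- A's loop, started at (n, c), adds the adjacent-mismatch count and leaves the last character.
theorem pvFoldA (l : List Char) (n : Int) (c : Char) :
    l.foldl (fun (st : Int × Char) p => if p ≠ st.2 then (st.1 + 1, p) else st) (n, c)
      = (n + pvB (c :: l), l.getLastD c) := by
  induction l generalizing n c with
  | nil => simp [pvB]
  | cons d rest ih =>
    rw [List.foldl_cons]
    by_cases h : d = c
    · subst h
      have hif : (if d ≠ d then (n + 1, d) else (n, d)) = (n, d) := by simp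
      rw [hif, ih, List.getLastD_cons]
      have hb : pvB (d :: d :: rest) = pvB (d :: rest) := by simp [pvB]
      rw [hb]
    · have hif : (if d ≠ c then (n + 1, d) else (n, c)) = (n + 1, d) := by simp [h]
      rw [hif, ih, List.getLastD_cons]
      have hb : pvB (c :: d :: rest) = 1 + pvB (d :: rest) := by simp [pvB, h]
      rw [hb, Prod.ext_iff]
      exact ⟨by ring, rfl⟩

theorem pvGetLast?_cons (c : Char) (l : List Char) :
    (c :: l).getLast? = some (l.getLastD c) := by
  induction l generalizing c with
  | nil => rfl
  | cons d rest ih => rw [List.getLast?_cons_cons, ih d, List.getLastD_cons]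

-- splitting pvB at a list concatenation: halves plus the junction pair
theorem pvB_append (c : Char) (xs : List Char) (d : Char) (ys : List Char) :
    pvB (c :: xs ++ d :: ys)
      = pvB (c :: xs) + (if d ≠ xs.getLastD c then 1 else 0) + pvB (d :: ys) := by
  induction xs generalizing c with
  | nil => simp [pvB]
  | cons e t ih =>
    have h1 : pvB (c :: e :: (t ++ d :: ys)) = (if e ≠ c then 1 else 0) + pvB (e :: (t ++ d :: ys)) := by
      simp [pvB]
    have h2 : pvB (c :: e :: t) = (if e ≠ c then 1 else 0) + pvB (e :: t) := by
      simp [pvB]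
    simp only [List.cons_append] at *
    rw [h1, ih e, h2, List.getLastD_cons]
    ring

theorem pvIteNe (a b : Char) : (if a ≠ b then (1 : Int) else 0) = (if b ≠ a then 1 else 0) := by
  by_cases hq : a = b
  · rw [if_neg (by simp [hq]), if_neg (by simp [hq])]
  · rw [if_pos hq, if_pos (Ne.symm hq)]

-- the divide-and-conquer count equals pvB of the corresponding slice
theorem pvBnd_eq (l : List Char) (fuel : Nat) : ∀ (i j : Nat), i ≤ j → j ≤ l.length →
    j - i ≤ fuel → pvBnd l fuel i j = pvB ((l.drop i).take (j - i)) := by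
  induction fuel with
  | zero =>
    intro i j hij hj hf
    have h0 : j - i = 0 := by omega
    rw [pvBnd, h0, List.take_zero]
    rfl
  | succ fuel ih =>
    intro i j hij hj hf
    rw [pvBnd]
    by_cases h : j - i < 2
    · have hlen : ((l.drop i).take (j - i)).length ≤ 1 := by
        have := List.length_take_le (j - i) (l.drop i)
        omega
      rw [if_pos h, pvB_short _ hlen]
    · rw [if_neg h]
      obtain ⟨m, hm⟩ : ∃ m, m = (i + j) / 2 := ⟨_, rfl⟩
      have hm1 : i < m := by omega
      have hm2 : m < j := by omega
      have ihl := ih i m (by omega) (by omega) (by omega)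
      have ihr := ih m j (by omega) hj (by omega)
      -- split the slice at m
      have hsplit : (l.drop i).take (j - i)
          = (l.drop i).take (m - i) ++ (l.drop m).take (j - m) := by
        have h1 : j - i = (m - i) + (j - m) := by omega
        rw [h1, List.take_add, List.drop_drop]
        have h2 : i + (m - i) = m := by omega
        rw [h2]
      -- both halves are nonempty
      obtain ⟨c, xs, hcx⟩ : ∃ c xs, (l.drop i).take (m - i) = c :: xs := by
        have hlen : ((l.drop i).take (m - i)).length = m - i := by
          rw [List.length_take, List.length_drop]; omega
        cases hx : (l.drop i).take (m - i) with
        | nil => rw [hx] at hlen; simp at hlen; omega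
        | cons c xs => exact ⟨c, xs, rfl⟩
      obtain ⟨d, ys, hdy⟩ : ∃ d ys, (l.drop m).take (j - m) = d :: ys := by
        have hlen : ((l.drop m).take (j - m)).length = j - m := by
          rw [List.length_take, List.length_drop]; omega
        cases hx : (l.drop m).take (j - m) with
        | nil => rw [hx] at hlen; simp at hlen; omega
        | cons d ys => exact ⟨d, ys, rfl⟩
      -- the junction characters
      have hlast : xs.getLastD c = l.getD (m - 1) ' ' := by
        have h1 : ((l.drop i).take (m - i)).getLast? = some (xs.getLastD c) := by
          rw [hcx, pvGetLast?_cons]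
        have hlen : ((l.drop i).take (m - i)).length = m - i := by
          rw [List.length_take, List.length_drop]; omega
        rw [List.getLast?_eq_getElem?, hlen] at h1
        have h2 : ((l.drop i).take (m - i))[m - i - 1]? = l[m - 1]? := by
          rw [List.getElem?_take_of_lt (by omega), List.getElem?_drop]
          congr 1
          omega
        rw [h2] at h1
        have h3 : l[m - 1]? = some (l.getD (m - 1) ' ') := by
          rw [List.getD_eq_getElem l ' ' (by omega)]
          exact List.getElem?_eq_getElem (by omega)
        rw [h3] at h1
        exact (Option.some_inj.mp h1).symm
      have hhead : d = l.getD m ' ' := by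
        have h1 : l[m]? = some d := by
          have h0 : ((l.drop m).take (j - m))[0]? = some d := by rw [hdy]; rfl
          rwa [List.getElem?_take_of_lt (by omega), List.getElem?_drop, Nat.add_zero] at h0
        have h3 : l[m]? = some (l.getD m ' ') := by
          rw [List.getD_eq_getElem l ' ' (by omega)]
          exact List.getElem?_eq_getElem (by omega)
        exact (Option.some_inj.mp (h3.symm.trans h1)).symm
      have hsw := pvIteNe (l.getD (m - 1) ' ') (l.getD m ' ')
      show pvBnd l fuel i ((i + j) / 2) + pvBnd l fuel ((i + j) / 2) j
            + (if l.getD ((i + j) / 2 - 1) ' ' ≠ l.getD ((i + j) / 2) ' ' then 1 else 0)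
          = pvB ((l.drop i).take (j - i))
      rw [← hm, ihl, ihr, hsplit, hcx, hdy, pvB_append, hlast, hhead, hsw]
      ring

theorem calculate_num_flips_spec : Claim_equal_calculate_num_flips := by
  intro s _hdom hpre
  unfold Spec_calculate_num_flips calculate_num_flips calculate_num_flips_alt
  have hne : s.toList ≠ [] := by
    intro h
    exact hpre (String.toList_inj.mp (by simpa using h))
  obtain ⟨c0, rest, hl⟩ := List.exists_cons_of_ne_nil hne
  have h0 : PySem.Str.pyGet? s 0 = some c0 := by
    have : PySem.Str.pyGet? s 0 = PySem.List.pyGet? s.toList 0 := by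
      simp [PySem.Str.pyGet?, PySem.Chars.pyGet?_eq_listPyGet?]
    rw [this, hl, PySem.List.pyGet?_zero_cons]
  have hm1 : PySem.Str.pyGet? s (-1) = some (rest.getLastD c0) := by
    have : PySem.Str.pyGet? s (-1) = PySem.List.pyGet? s.toList (-1) := by
      simp [PySem.Str.pyGet?, PySem.Chars.pyGet?_eq_listPyGet?]
    rw [this, PySem.List.pyGet?_neg_one, hl, pvGetLast?_cons]
  rw [h0, hm1]
  have hbnd : pvBnd s.toList s.toList.length 0 s.toList.length = pvB s.toList := by
    rw [pvBnd_eq s.toList s.toList.length 0 s.toList.length (by omega) (le_refl _) (by omega),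
      Nat.sub_zero, List.drop_zero, List.take_length]
  rw [hbnd, hl]
  simp only [List.foldl_cons]
  have hstep : (if c0 ≠ c0 then ((0 : Int) + 1, c0) else ((0 : Int), c0)) = (0, c0) := by simp
  rw [hstep, pvFoldA]
  show PySem.Int.toStr (if (rest.getLastD c0 == '-') = true then 0 + pvB (c0 :: rest) + 1
        else 0 + pvB (c0 :: rest))
      = PySem.Int.toStr (pvB (c0 :: rest) + if (rest.getLastD c0 == '-') = true then 1 else 0)
  congr 1
  split_ifs <;> ring
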